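-- pv_equiv track=rewrite | github.com/khanjason/leetcode | 386.py | lexsort
-- ===== SOURCE A (Python) =====
-- def lexsort(n):
--     s=[]
--     for i in range(1,n+1):
--         s.append(str(i))
--     s=sorted(s)
--     ans=[]
--     for i in range(0,n):
--         ans.append(int(s[i]))
--     return ans
-- ===== SOURCE B (Python) =====
-- def lexsort(n):
--     # DFS over the decimal trie of number *names*: emits the names in
--     # lexicographic order directly (no sort), then converts once at the end.
--     def dfs(val, name):
--         out = [name]
--         for d in range(10):
--             child = val * 10 + d
--             if child <= n:
--                 out += dfs(child, name + str(d))
--         return out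
--     names = []
--     for d in range(1, 10):
--         if d <= n:
--             names += dfs(d, str(d))
--     return [int(name) for name in names]
-- ===== Notes on version B (the rewrite author's own statement) =====
-- stated objective: alternative
-- what changed: replaced build-all-strings/comparison-sort/index-back-and-parse by a DFS preorder over the decimal trie that generates the number names already in lexicographic order (no sorting pass), converting to int once at the end
import Mathlib
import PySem

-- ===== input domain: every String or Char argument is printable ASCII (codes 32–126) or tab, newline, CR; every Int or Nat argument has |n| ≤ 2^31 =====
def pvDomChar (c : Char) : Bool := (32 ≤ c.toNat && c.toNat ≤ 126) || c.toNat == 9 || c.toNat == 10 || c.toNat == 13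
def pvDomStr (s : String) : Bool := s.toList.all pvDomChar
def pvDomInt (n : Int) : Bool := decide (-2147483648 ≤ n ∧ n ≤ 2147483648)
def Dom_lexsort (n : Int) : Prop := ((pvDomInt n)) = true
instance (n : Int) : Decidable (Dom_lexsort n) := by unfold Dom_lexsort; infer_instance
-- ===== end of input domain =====

-- B replaces A's build-strings/sort/parse-back pipeline by a DFS preorder over the
-- decimal trie that generates the number names already in lexicographic order
-- (objective: alternative algorithm, no sorting pass; not measurably faster).

-- ===== PORT A =====
def lexsort (n : Int) : List Int :=
  let s := (PySem.List.pyRange 1 (n + 1) 1).foldl (fun s i => s ++ [PySem.Int.toStr i]) []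
  let s2 := PySem.List.sorted s (fun x => x) false
  (PySem.List.pyRange 0 n 1).foldl
    (fun ans i => ans ++ [(PySem.Int.ofStr? (PySem.List.pyGetD s2 i "")).getD 0]) []

-- ===== PORT B =====
-- the inner `dfs(val, name)` of Source B; the fuel argument only makes the recursion
-- structural (the supplied fuel is never exhausted on the calls that occur)
def lexsortDfs (n : Int) : Nat → Int → String → List String
  | 0, _, _ => []
  | fuel + 1, val, name =>
    (PySem.List.pyRange 0 10 1).foldl
      (fun out d =>
        out ++ (if val * 10 + d ≤ n then lexsortDfs n fuel (val * 10 + d) (name ++ PySem.Int.toStr d) else []))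
      [name]

def lexsort_alt (n : Int) : List Int :=
  let names := (PySem.List.pyRange 1 10 1).foldl
    (fun names d => names ++ (if d ≤ n then lexsortDfs n n.toNat d (PySem.Int.toStr d) else [])) []
  names.map (fun name => (PySem.Int.ofStr? name).getD 0)

-- ===== PRECONDITION & SPEC =====
def Spec_lexsort (n : Int) (out : List Int) : Prop := out = lexsort_alt n
instance (n : Int) (out : List Int) : Decidable (Spec_lexsort n out) := by unfold Spec_lexsort; infer_instance

-- ===== CLAIM (what is proved, stated in full; the proofs are below) =====
def Claim_equal_lexsort : Prop := ∀ (n : Int), Dom_lexsort n → Spec_lexsort n (lexsort n)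

-- ===== LEMMAS AND PROOFS =====

-- decimal digit characters of a natural number (mirrors Nat.toDigits 10 without fuel)
def decChars (m : Nat) : List Char :=
  if m / 10 = 0 then [Nat.digitChar (m % 10)]
  else decChars (m / 10) ++ [Nat.digitChar (m % 10)]
termination_by m
decreasing_by omega

lemma decChars_low (m : Nat) (h : m < 10) : decChars m = [Nat.digitChar m] := by
  rw [decChars, if_pos (by omega), Nat.mod_eq_of_lt h]

lemma decChars_high (m : Nat) (h : 10 ≤ m) :
    decChars m = decChars (m / 10) ++ [Nat.digitChar (m % 10)] := by
  rw [decChars, if_neg (by omega)]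

lemma toDigitsCore_eq_decChars : ∀ (f m : Nat) (ds : List Char), m < f →
    Nat.toDigitsCore 10 f m ds = decChars m ++ ds := by
  intro f
  induction f with
  | zero => omega
  | succ f ih =>
    intro m ds hm
    rw [Nat.toDigitsCore.eq_def]
    by_cases h0 : m / 10 = 0
    · simp only [h0, if_true]
      rw [decChars_low m (by omega), Nat.mod_eq_of_lt (by omega)]
      simp
    · simp only [h0, if_false]
      rw [ih (m / 10) _ (by omega), decChars_high m (by omega)]
      simp

lemma toChars_eq_decChars (m : Int) (h : 0 ≤ m) :
    PySem.Int.toChars m = decChars m.toNat := by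
  simp only [PySem.Int.toChars, if_neg (by omega : ¬ m < 0), Nat.toDigits]
  rw [toDigitsCore_eq_decChars _ _ _ (by omega)]
  simp

lemma decChars_step (a d : Nat) (ha : 1 ≤ a) (hd : d < 10) :
    decChars (10 * a + d) = decChars a ++ [Nat.digitChar d] := by
  rw [decChars_high (10 * a + d) (by omega),
    show (10 * a + d) / 10 = a by omega, show (10 * a + d) % 10 = d by omega]

lemma decChars_ne_nil (m : Nat) : decChars m ≠ [] := by
  rw [decChars]; split <;> simp

lemma decChars_len_one (m : Nat) (h : m < 10) : (decChars m).length = 1 := by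
  rw [decChars_low m h]; rfl

lemma digitChar_inj : ∀ a < 10, ∀ b < 10, Nat.digitChar a = Nat.digitChar b → a = b := by decide

lemma digitChar_lt : ∀ a < 10, ∀ b < 10, a < b → Nat.digitChar a < Nat.digitChar b := by decide

lemma decChars_length_ge_two (m : Nat) (h : 10 ≤ m) : 2 ≤ (decChars m).length := by
  rw [decChars_high m h]
  have : 0 < (decChars (m / 10)).length := List.length_pos_iff.mpr (decChars_ne_nil (m / 10))
  simp only [List.length_append, List.length_cons, List.length_nil]
  omega

lemma decChars_inj : ∀ a b : Nat, decChars a = decChars b → a = b := by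
  intro a
  induction a using Nat.strong_induction_on with
  | _ a ih =>
    intro b h
    by_cases ha : a < 10 <;> by_cases hb : b < 10
    · rw [decChars_low a ha, decChars_low b hb] at h
      exact digitChar_inj a ha b hb (by simpa using h)
    · have h2 := decChars_length_ge_two b (by omega)
      have h1 := decChars_len_one a ha
      rw [h] at h1; omega
    · have h2 := decChars_length_ge_two a (by omega)
      have h1 := decChars_len_one b hb
      rw [← h] at h1; omega
    · rw [decChars_high a (by omega), decChars_high b (by omega)] at h
      have h' := congrArg List.reverse h
      simp only [List.reverse_append, List.reverse_cons, List.reverse_nil, List.nil_append,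
        List.cons_append, List.cons.injEq] at h'
      obtain ⟨hdig, hrev⟩ := h'
      have hpre : decChars (a / 10) = decChars (b / 10) := by
        have := congrArg List.reverse hrev; simpa using this
      have h10 : a / 10 = b / 10 := ih (a / 10) (by omega) _ hpre
      have hmod : a % 10 = b % 10 :=
        digitChar_inj _ (by omega) _ (by omega) hdig
      omega

lemma decChars_prefix_le : ∀ b a : Nat, 1 ≤ a → 1 ≤ b →
    decChars a <+: decChars b → a ≤ b := by
  intro b
  induction b using Nat.strong_induction_on with
  | _ b ih =>
    intro a ha hb hpre
    by_cases hblt : b < 10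
    · have hlen := hpre.length_le
      rw [decChars_len_one b hblt] at hlen
      have hpos : 0 < (decChars a).length := List.length_pos_iff.mpr (decChars_ne_nil a)
      have heq := hpre.eq_of_length (by rw [decChars_len_one b hblt]; omega)
      have := decChars_inj a b heq
      omega
    · rw [decChars_high b (by omega)] at hpre
      rcases List.prefix_concat_iff.mp hpre with heq | hpre'
      · have : a = b := decChars_inj a b (by rw [heq, decChars_high b (by omega)])
        omega
      · have := ih (b / 10) (by omega) a ha (by omega) hpre'
        omega

lemma decChars_prefix_dvd (m : Nat) (h : 10 ≤ m) :
    decChars (m / 10) <+: decChars m := by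
  rw [decChars_high m h]
  exact List.prefix_append _ _

lemma decChars_prefix_step : ∀ m cur : Nat, 1 ≤ cur → 1 ≤ m → cur ≠ m →
    decChars cur <+: decChars m →
    ∃ d, d < 10 ∧ decChars (10 * cur + d) <+: decChars m := by
  intro m
  induction m using Nat.strong_induction_on with
  | _ m ih =>
    intro cur hcur hm hne hpre
    by_cases hmlt : m < 10
    · exfalso
      have hlen := hpre.length_le
      rw [decChars_len_one m hmlt] at hlen
      have hpos : 0 < (decChars cur).length := List.length_pos_iff.mpr (decChars_ne_nil cur)
      have heq := hpre.eq_of_length (by rw [decChars_len_one m hmlt]; omega)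
      exact hne (decChars_inj cur m heq)
    · have hsplit := decChars_high m (by omega : 10 ≤ m)
      rw [hsplit] at hpre
      rcases List.prefix_concat_iff.mp hpre with heq | hpre'
      · exact absurd (decChars_inj cur m (by rw [heq, hsplit])) hne
      · by_cases hc : cur = m / 10
        · refine ⟨m % 10, by omega, ?_⟩
          rw [hc, show 10 * (m / 10) + m % 10 = m by omega]
        · obtain ⟨d, hd, hp⟩ := ih (m / 10) (by omega) cur hcur (by omega) hc hpre'
          exact ⟨d, hd, hp.trans (decChars_prefix_dvd m (by omega))⟩

lemma exists_root : ∀ m : Nat, 1 ≤ m →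
    ∃ d : Nat, 1 ≤ d ∧ d ≤ 9 ∧ decChars d <+: decChars m := by
  intro m
  induction m using Nat.strong_induction_on with
  | _ m ih =>
    intro hm
    by_cases hmlt : m < 10
    · exact ⟨m, hm, by omega, List.prefix_refl _⟩
    · obtain ⟨d, h1, h9, hp⟩ := ih (m / 10) (by omega) (by omega)
      exact ⟨d, h1, h9, hp.trans (decChars_prefix_dvd m (by omega))⟩

-- lexicographic order facts on List Char / String
lemma lex_of_strict_prefix (p u : List Char) (hu : u ≠ []) :
    List.Lex (· < ·) p (p ++ u) := by
  induction p with
  | nil => cases u with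
    | nil => exact absurd rfl hu
    | cons c cs => exact List.Lex.nil
  | cons c cs ih => exact List.Lex.cons ih

lemma lex_append_lt (p : List Char) (c c' : Char) (u v : List Char) (h : c < c') :
    List.Lex (· < ·) (p ++ c :: u) (p ++ c' :: v) := by
  induction p with
  | nil => exact List.Lex.rel h
  | cons a as ih => exact List.Lex.cons ih

lemma str_lt_of_lex (s t : String) (h : List.Lex (· < ·) s.toList t.toList) : s < t := by
  rw [String.lt_iff_toList_lt]
  exact (List.lt_iff_lex_lt _ _).mpr h

-- the spec preorder over the integer trie (same fuel discipline as lexsortDfs)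
def specT (n : Int) : Nat → Int → List Int
  | 0, _ => []
  | fuel + 1, val =>
    val :: (PySem.List.pyRange 0 10 1).flatMap
      (fun d => if val * 10 + d ≤ n then specT n fuel (val * 10 + d) else [])

lemma toStr_child (val d : Int) (hv : 1 ≤ val) (hd0 : 0 ≤ d) (hd : d < 10) :
    PySem.Int.toStr val ++ PySem.Int.toStr d = PySem.Int.toStr (val * 10 + d) := by
  apply String.toList_injective
  rw [String.toList_append]
  simp only [PySem.Int.toList_toStr]
  rw [toChars_eq_decChars val (by omega), toChars_eq_decChars d (by omega),
    toChars_eq_decChars _ (by omega)]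
  rw [decChars_low d.toNat (by omega)]
  rw [show (val * 10 + d).toNat = 10 * val.toNat + d.toNat by omega]
  rw [decChars_step val.toNat d.toNat (by omega) (by omega)]

lemma dfs_eq_map (n : Int) : ∀ (fuel : Nat) (val : Int), 1 ≤ val →
    lexsortDfs n fuel val (PySem.Int.toStr val) = (specT n fuel val).map PySem.Int.toStr := by
  intro fuel
  induction fuel with
  | zero => intro val _; simp [lexsortDfs, specT]
  | succ fuel ih =>
    intro val hv
    rw [lexsortDfs, specT]
    rw [PySem.List.foldl_append_eq_flatMap
      (fun d => if val * 10 + d ≤ n then lexsortDfs n fuel (val * 10 + d) (PySem.Int.toStr val ++ PySem.Int.toStr d) else [])]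
    rw [List.map_cons, List.map_flatMap, List.singleton_append]
    congr 1
    apply List.flatMap_congr
    intro d hd
    rw [PySem.List.mem_pyRange_one] at hd
    rw [apply_ite (List.map PySem.Int.toStr), List.map_nil]
    by_cases hle : val * 10 + d ≤ n
    · simp only [hle, if_true]
      rw [toStr_child val d hv (by omega) (by omega)]
      exact ih (val * 10 + d) (by omega)
    · simp [hle]

-- membership in the spec preorder
def NatPref (a b : Int) : Prop := decChars a.toNat <+: decChars b.toNat

lemma mem_specT (n : Int) : ∀ (fuel : Nat) (val m : Int), 1 ≤ val → val ≤ n →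
    m ∈ specT n fuel val → val ≤ m ∧ m ≤ n ∧ NatPref val m := by
  intro fuel
  induction fuel with
  | zero => intro val m _ _ h; simp [specT] at h
  | succ fuel ih =>
    intro val m hv hvn hm
    rw [specT] at hm
    rcases List.mem_cons.mp hm with rfl | hm
    · exact ⟨le_refl _, hvn, List.prefix_refl _⟩
    · rw [List.mem_flatMap] at hm
      obtain ⟨d, hd, hmem⟩ := hm
      rw [PySem.List.mem_pyRange_one] at hd
      by_cases hle : val * 10 + d ≤ n
      · rw [if_pos hle] at hmem
        obtain ⟨h1, h2, h3⟩ := ih (val * 10 + d) m (by omega) hle hmem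
        refine ⟨by omega, h2, ?_⟩
        unfold NatPref at h3 ⊢
        refine List.IsPrefix.trans ?_ h3
        rw [show (val * 10 + d).toNat = 10 * val.toNat + d.toNat by omega,
          decChars_step val.toNat d.toNat (by omega) (by omega)]
        exact List.prefix_append _ _
      · rw [if_neg hle] at hmem; simp at hmem

lemma specT_mem_of (n : Int) : ∀ (fuel : Nat) (val m : Int), 1 ≤ val → val ≤ m → m ≤ n →
    NatPref val m → (n - val).toNat < fuel → m ∈ specT n fuel val := by
  intro fuel
  induction fuel with
  | zero => intro val m _ hvm hmn _ hf; omega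
  | succ fuel ih =>
    intro val m hv hvm hmn hpre hf
    rw [specT]
    by_cases hvm' : val = m
    · exact hvm' ▸ List.mem_cons_self
    · apply List.mem_cons_of_mem
      obtain ⟨d, hd10, hdp⟩ :=
        decChars_prefix_step m.toNat val.toNat (by omega) (by omega) (by omega) hpre
      rw [List.mem_flatMap]
      refine ⟨(d : Int), by rw [PySem.List.mem_pyRange_one]; omega, ?_⟩
      have hchild : (val * 10 + (d : Int)).toNat = 10 * val.toNat + d := by omega
      have hcm : val * 10 + (d : Int) ≤ m := by
        have := decChars_prefix_le m.toNat (val * 10 + (d : Int)).toNat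
          (by omega) (by omega) (by rw [hchild]; exact hdp)
        omega
      rw [if_pos (by omega)]
      exact ih (val * 10 + (d : Int)) m (by omega) hcm hmn
        (by unfold NatPref; rw [hchild]; exact hdp) (by omega)

-- an element of a guarded child subtree extends the parent's digits by the child digit
lemma child_decomp (n : Int) (fuel : Nat) (val d m : Int) (hv : 1 ≤ val)
    (hd : 0 ≤ d) (hd10 : d < 10) (hle : val * 10 + d ≤ n)
    (hm : m ∈ specT n fuel (val * 10 + d)) :
    ∃ w, decChars m.toNat = decChars val.toNat ++ Nat.digitChar d.toNat :: w := by
  obtain ⟨h1, _, h3⟩ := mem_specT n fuel (val * 10 + d) m (by omega) hle hm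
  unfold NatPref at h3
  obtain ⟨w, hw⟩ := h3
  refine ⟨w, ?_⟩
  rw [show (val * 10 + d).toNat = 10 * val.toNat + d.toNat by omega,
    decChars_step val.toNat d.toNat (by omega) (by omega)] at hw
  rw [← hw]; simp

lemma pairwise_flatMap_of {α β : Type} (R : β → β → Prop) (g : α → List β) (l : List α)
    (h1 : ∀ a ∈ l, (g a).Pairwise R)
    (h2 : l.Pairwise (fun a b => ∀ x ∈ g a, ∀ y ∈ g b, R x y)) :
    (l.flatMap g).Pairwise R := by
  induction l with
  | nil => simp
  | cons a l ihl =>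
    rw [List.flatMap_cons, List.pairwise_append]
    refine ⟨h1 a List.mem_cons_self, ihl (fun b hb => h1 b (List.mem_cons_of_mem _ hb))
      (List.Pairwise.of_cons h2), ?_⟩
    intro x hx y hy
    rw [List.mem_flatMap] at hy
    obtain ⟨b, hb, hyb⟩ := hy
    exact (List.rel_of_pairwise_cons h2 hb) x hx y hyb

lemma toStr_lt_of_decChars_lex (a b : Int) (ha : 0 ≤ a) (hb : 0 ≤ b)
    (h : List.Lex (· < ·) (decChars a.toNat) (decChars b.toNat)) :
    PySem.Int.toStr a < PySem.Int.toStr b := by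
  apply str_lt_of_lex
  rw [PySem.Int.toList_toStr, PySem.Int.toList_toStr,
    toChars_eq_decChars a ha, toChars_eq_decChars b hb]
  exact h

lemma pairwise_specT (n : Int) : ∀ (fuel : Nat) (val : Int), 1 ≤ val → val ≤ n →
    (specT n fuel val).Pairwise (fun a b => PySem.Int.toStr a < PySem.Int.toStr b) := by
  intro fuel
  induction fuel with
  | zero => intro val _ _; simp [specT]
  | succ fuel ih =>
    intro val hv hvn
    rw [specT, List.pairwise_cons]
    constructor
    · intro m hm
      rw [List.mem_flatMap] at hm
      obtain ⟨d, hd, hmem⟩ := hm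
      rw [PySem.List.mem_pyRange_one] at hd
      by_cases hle : val * 10 + d ≤ n
      · rw [if_pos hle] at hmem
        obtain ⟨w, hw⟩ := child_decomp n fuel val d m hv (by omega) (by omega) hle hmem
        apply toStr_lt_of_decChars_lex val m (by omega) ?_
        · rw [hw]; exact lex_of_strict_prefix _ _ (by simp)
        · obtain ⟨h1, _, _⟩ := mem_specT n fuel (val * 10 + d) m (by omega) hle hmem
          omega
      · rw [if_neg hle] at hmem; simp at hmem
    · apply pairwise_flatMap_of
      · intro d hd
        rw [PySem.List.mem_pyRange_one] at hd
        by_cases hle : val * 10 + d ≤ n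
        · rw [if_pos hle]; exact ih (val * 10 + d) (by omega) hle
        · rw [if_neg hle]; simp
      · have hpw := PySem.List.pairwise_lt_pyRange_one (a := 0) (b := 10)
        refine hpw.imp_of_mem ?_
        intro d d' hdm hdm' hdd'
        rw [PySem.List.mem_pyRange_one] at hdm hdm'
        intro x hx y hy
        by_cases hle : val * 10 + d ≤ n
        · by_cases hle' : val * 10 + d' ≤ n
          · rw [if_pos hle] at hx; rw [if_pos hle'] at hy
            obtain ⟨u, hu⟩ := child_decomp n fuel val d x hv (by omega) (by omega) hle hx
            obtain ⟨w, hw⟩ := child_decomp n fuel val d' y hv (by omega) (by omega) hle' hy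
            obtain ⟨hx1, _, _⟩ := mem_specT n fuel (val * 10 + d) x (by omega) hle hx
            obtain ⟨hy1, _, _⟩ := mem_specT n fuel (val * 10 + d') y (by omega) hle' hy
            apply toStr_lt_of_decChars_lex x y (by omega) (by omega)
            rw [hu, hw]
            exact lex_append_lt _ _ _ _ _
              (digitChar_lt d.toNat (by omega) d'.toNat (by omega) (by omega))
          · rw [if_neg hle'] at hy; simp at hy
        · rw [if_neg hle] at hx; simp at hx

-- the full preorder over all nine root subtrees
def fullT (n : Int) : List Int :=
  (PySem.List.pyRange 1 10 1).flatMap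
    (fun d => if d ≤ n then specT n n.toNat d else [])

lemma mem_fullT (n : Int) (m : Int) : m ∈ fullT n ↔ 1 ≤ m ∧ m ≤ n := by
  unfold fullT
  rw [List.mem_flatMap]
  constructor
  · rintro ⟨d, hd, hm⟩
    rw [PySem.List.mem_pyRange_one] at hd
    by_cases hle : d ≤ n
    · rw [if_pos hle] at hm
      obtain ⟨h1, h2, _⟩ := mem_specT n n.toNat d m (by omega) hle hm
      exact ⟨by omega, h2⟩
    · rw [if_neg hle] at hm; simp at hm
  · rintro ⟨h1, h2⟩
    obtain ⟨d, hd1, hd9, hdp⟩ := exists_root m.toNat (by omega)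
    have hdm : (d : Int) ≤ m := by
      have := decChars_prefix_le m.toNat d (by omega) (by omega) hdp
      omega
    refine ⟨(d : Int), by rw [PySem.List.mem_pyRange_one]; omega, ?_⟩
    rw [if_pos (by omega)]
    exact specT_mem_of n n.toNat (d : Int) m (by omega) hdm h2
      (by unfold NatPref; rw [show ((d : Int)).toNat = d by omega]; exact hdp) (by omega)

lemma pairwise_fullT (n : Int) :
    (fullT n).Pairwise (fun a b => PySem.Int.toStr a < PySem.Int.toStr b) := by
  unfold fullT
  apply pairwise_flatMap_of
  · intro d hd
    rw [PySem.List.mem_pyRange_one] at hd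
    by_cases hle : d ≤ n
    · rw [if_pos hle]; exact pairwise_specT n n.toNat d (by omega) hle
    · rw [if_neg hle]; simp
  · have hpw := PySem.List.pairwise_lt_pyRange_one (a := 1) (b := 10)
    refine hpw.imp_of_mem ?_
    intro d d' hdm hdm' hdd'
    rw [PySem.List.mem_pyRange_one] at hdm hdm'
    intro x hx y hy
    by_cases hle : d ≤ n
    · by_cases hle' : d' ≤ n
      · rw [if_pos hle] at hx; rw [if_pos hle'] at hy
        obtain ⟨hx1, _, hx3⟩ := mem_specT n n.toNat d x (by omega) hle hx
        obtain ⟨hy1, _, hy3⟩ := mem_specT n n.toNat d' y (by omega) hle' hy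
        unfold NatPref at hx3 hy3
        rw [decChars_low d.toNat (by omega)] at hx3
        rw [decChars_low d'.toNat (by omega)] at hy3
        obtain ⟨u, hu⟩ := hx3
        obtain ⟨w, hw⟩ := hy3
        apply toStr_lt_of_decChars_lex x y (by omega) (by omega)
        rw [← hu, ← hw, List.singleton_append, List.singleton_append]
        exact lex_append_lt [] _ _ _ _
          (digitChar_lt d.toNat (by omega) d'.toNat (by omega) (by omega))
      · rw [if_neg hle'] at hy; simp at hy
    · rw [if_neg hle] at hx; simp at hx

lemma toStr_inj_on_nonneg (a b : Int) (ha : 0 ≤ a) (hb : 0 ≤ b)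
    (h : PySem.Int.toStr a = PySem.Int.toStr b) : a = b := by
  have h' := congrArg String.toList h
  rw [PySem.Int.toList_toStr, PySem.Int.toList_toStr,
    toChars_eq_decChars a ha, toChars_eq_decChars b hb] at h'
  have := decChars_inj a.toNat b.toNat h'
  omega

-- B's names list is exactly the lexicographically sorted list of A's strings
lemma names_eq_sorted (n : Int) :
    PySem.List.sorted ((PySem.List.pyRange 1 (n + 1) 1).map PySem.Int.toStr) (fun x => x) false
      = (fullT n).map PySem.Int.toStr := by
  apply PySem.List.sorted_eq_of_perm_of_pairwise_lt
  · apply (List.perm_ext_iff_of_nodup ?_ ?_).mpr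
    · intro t
      simp only [List.mem_map]
      constructor
      · rintro ⟨m, hm, rfl⟩
        rw [mem_fullT] at hm
        exact ⟨m, by rw [PySem.List.mem_pyRange_one]; omega, rfl⟩
      · rintro ⟨m, hm, rfl⟩
        rw [PySem.List.mem_pyRange_one] at hm
        exact ⟨m, by rw [mem_fullT]; omega, rfl⟩
    · have := pairwise_fullT n
      exact ((List.pairwise_map).mpr this).imp ne_of_lt
    · apply List.Nodup.map_on
      · intro a hb b hb' hab
        rw [PySem.List.mem_pyRange_one] at hb hb'
        exact toStr_inj_on_nonneg a b (by omega) (by omega) hab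
      · exact PySem.List.nodup_pyRange_one 1 (n + 1)
  · exact (List.pairwise_map).mpr (pairwise_fullT n)

lemma names_foldl_eq (n : Int) :
    (PySem.List.pyRange 1 10 1).foldl
      (fun names d => names ++ (if d ≤ n then lexsortDfs n n.toNat d (PySem.Int.toStr d) else [])) []
      = (fullT n).map PySem.Int.toStr := by
  rw [PySem.List.foldl_append_eq_flatMap
    (fun d => if d ≤ n then lexsortDfs n n.toNat d (PySem.Int.toStr d) else [])]
  rw [List.nil_append]
  unfold fullT
  rw [List.map_flatMap]
  apply List.flatMap_congr
  intro d hd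
  rw [PySem.List.mem_pyRange_one] at hd
  by_cases hle : d ≤ n
  · rw [if_pos hle, if_pos hle]
    exact dfs_eq_map n n.toNat d (by omega)
  · rw [if_neg hle, if_neg hle]; simp

-- ===== VERDICT (by name: the statement is the Claim_ definition above) =====
theorem lexsort_spec : Claim_equal_lexsort := by
  intro n _
  unfold Spec_lexsort lexsort lexsort_alt
  rw [names_foldl_eq n]
  rw [PySem.List.foldl_append_singleton_eq_map PySem.Int.toStr, List.nil_append]
  by_cases hn : n ≤ 0
  · rw [PySem.List.pyRange_one_eq_nil (by omega : n + 1 ≤ 1),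
      PySem.List.pyRange_one_eq_nil (by omega : n ≤ 0)]
    simp only [List.map_nil, List.foldl_nil]
    have : fullT n = [] := by
      apply List.flatMap_eq_nil_iff.mpr
      intro d hd
      rw [PySem.List.mem_pyRange_one] at hd
      rw [if_neg (by omega)]
    rw [this]; simp
  · rw [PySem.List.foldl_append_singleton_eq_map
      (fun i => (PySem.Int.ofStr? (PySem.List.pyGetD
        (PySem.List.sorted ((PySem.List.pyRange 1 (n + 1) 1).map PySem.Int.toStr) (fun x => x) false) i "")).getD 0),
      List.nil_append]
    have hlen : ((PySem.List.sorted ((PySem.List.pyRange 1 (n + 1) 1).map PySem.Int.toStr)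
        (fun x => x) false).length : Int) = n := by
      rw [PySem.List.length_sorted, List.length_map, PySem.List.length_pyRange_one]
      omega
    rw [show PySem.List.pyRange 0 n 1 = PySem.List.pyRange 0
      ((PySem.List.sorted ((PySem.List.pyRange 1 (n + 1) 1).map PySem.Int.toStr)
        (fun x => x) false).length : Int) 1 by rw [hlen]]
    rw [show (fun i => (PySem.Int.ofStr? (PySem.List.pyGetD
        (PySem.List.sorted ((PySem.List.pyRange 1 (n + 1) 1).map PySem.Int.toStr) (fun x => x) false) i "")).getD 0)
      = (fun name => (PySem.Int.ofStr? name).getD 0) ∘ (fun i => PySem.List.pyGetD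
        (PySem.List.sorted ((PySem.List.pyRange 1 (n + 1) 1).map PySem.Int.toStr) (fun x => x) false) i "") from rfl]
    rw [← List.map_map]
    rw [PySem.List.map_pyGetD_pyRange_zero']
    rw [names_eq_sorted n]
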